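-- pv_equiv track=rewrite | github.com/struggling-student/PythonExercises | PythonExercises/Ordinamento/78/solution.py | es78
-- ===== SOURCE A (Python) =====
-- def es78(parola):
--     if len(parola)==1: return [parola]
--     a=parola[0]
--     lista= es78(parola[1:])
--     lista1=lista[:]
--     if a not in lista1: lista1+=[a]
--     for y in lista:
--         if a<=y[0] and a+y not in lista1: lista1+=[a+y]
--     return sorted(lista1)
-- ===== SOURCE B (Python) =====
-- def es78(parola):
--     # Iterative forward pass: maintain the set of all distinct non-empty
--     # non-decreasing subsequences of the prefix scanned so far.
--     res = set()
--     for c in parola: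
--         for p in list(res):
--             if p[-1] <= c:
--                 res.add(p + c)
--         res.add(c)
--     return sorted(res)
-- ===== Notes on version B (the rewrite author's own statement) =====
-- stated objective: alternative
-- what changed: A recurses over suffixes, re-sorting and re-deduplicating a Python list (with linear membership scans) at every recursion level; B makes one forward pass over the characters maintaining a set of the distinct non-decreasing subsequences seen so far and sorts once at the end.
import Mathlib
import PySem

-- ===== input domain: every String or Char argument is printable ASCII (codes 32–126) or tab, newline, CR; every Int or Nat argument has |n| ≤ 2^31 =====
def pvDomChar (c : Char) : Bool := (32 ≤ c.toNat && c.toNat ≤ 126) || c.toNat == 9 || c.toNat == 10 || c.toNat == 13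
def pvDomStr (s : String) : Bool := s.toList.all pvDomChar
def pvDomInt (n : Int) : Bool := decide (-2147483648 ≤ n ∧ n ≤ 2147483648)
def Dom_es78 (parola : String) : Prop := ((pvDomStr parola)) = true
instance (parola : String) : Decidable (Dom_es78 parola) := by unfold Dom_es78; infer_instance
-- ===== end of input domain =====

-- B replaces A's suffix recursion (which re-sorts and re-deduplicates a list at every level) by a
-- single forward pass maintaining a set of subsequences, sorted once at the end (objective: alternative).

-- ===== PORT A =====
-- A's code, ported over List Char (strings go through toList; sorting lists of chars
-- lexicographically is exactly Python's string sort). The [] case of es78chars is where Python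
-- raises IndexError on parola[0]; it is excluded by Pre_es78.
-- the body of A's for-loop: if a<=y[0] and a+y not in lista1: lista1+=[a+y]
def es78StepA (a : Char) (acc : List (List Char)) (y : List Char) : List (List Char) :=
  match y with
  | [] => acc  -- y[0] on an empty y: unreachable (every element of lista is non-empty)
  | b :: _ => if a ≤ b && !(acc.contains (a :: y)) then acc ++ [a :: y] else acc

def es78chars : List Char → List (List Char)
  | [] => []
  | [c] => [[c]]
  | a :: b :: t =>
      let lista := es78chars (b :: t)
      let lista1 := if lista.contains [a] then lista else lista ++ [[a]]
      let lista2 := lista.foldl (es78StepA a) lista1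
      PySem.List.sorted lista2 (fun x => x) false

def es78 (parola : String) : List String :=
  (es78chars parola.toList).map (fun w => String.ofList w)

-- ===== PORT B =====
-- the body of B's inner loop: if p[-1] <= c: res.add(p + c)
def es78AltInner (c : Char) (acc : List (List Char)) (p : List Char) : List (List Char) :=
  match p.getLast? with
  | none => acc  -- p[-1] on an empty p: unreachable (every element of res is non-empty)
  | some b => if b ≤ c then PySem.Set.add acc (p ++ [c]) else acc

-- one outer step: for p in list(res): if p[-1] <= c: res.add(p + c);  res.add(c)
def es78AltStep (c : Char) (res : PySem.Set (List Char)) : PySem.Set (List Char) :=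
  PySem.Set.add (res.foldl (es78AltInner c) res) [c]

def es78AltCore (s : List Char) : List (List Char) :=
  PySem.List.sorted (s.foldl (fun res c => es78AltStep c res) (PySem.Set.ofList [])) (fun x => x) false

def es78_alt (parola : String) : List String :=
  (es78AltCore parola.toList).map (fun w => String.ofList w)

-- ===== PRECONDITION & SPEC =====
-- Pre_ excludes only the empty string, on which A raises IndexError (parola[0]).
def Pre_es78 (parola : String) : Prop := parola ≠ ""
instance (parola : String) : Decidable (Pre_es78 parola) := by unfold Pre_es78; infer_instance
def pvWitness_es78 : String := "ab"

def Spec_es78 (parola : String) (out : List String) : Prop := out = es78_alt parola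
instance (parola : String) (out : List String) : Decidable (Spec_es78 parola out) := by unfold Spec_es78; infer_instance

-- ===== CLAIM (what is proved, stated in full; the proofs are below) =====
def Claim_equal_es78 : Prop := ∀ (parola : String), Dom_es78 parola → Pre_es78 parola → Spec_es78 parola (es78 parola)

-- ===== LEMMAS AND PROOFS =====

-- The common specification set: non-empty non-decreasing subsequences of s.
def NDS (s w : List Char) : Prop := w ≠ [] ∧ w.Sublist s ∧ w.IsChain (· ≤ ·)

lemma NDS_cons (a : Char) (t w : List Char) :
    NDS (a :: t) w ↔ NDS t w ∨ w = [a] ∨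
      ∃ y, NDS t y ∧ (∃ b t', y = b :: t' ∧ a ≤ b) ∧ w = a :: y := by
  constructor
  · rintro ⟨hne, hsub, hch⟩
    rcases List.sublist_cons_iff.mp hsub with h | ⟨r, rfl, hr⟩
    · exact Or.inl ⟨hne, h, hch⟩
    · rcases r with _ | ⟨b, t'⟩
      · exact Or.inr (Or.inl rfl)
      · refine Or.inr (Or.inr ⟨b :: t', ⟨List.cons_ne_nil _ _, hr, (List.isChain_cons_cons.mp hch).2⟩,
          ⟨b, t', rfl, (List.isChain_cons_cons.mp hch).1⟩, rfl⟩)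
  · rintro (⟨hne, hsub, hch⟩ | rfl | ⟨y, ⟨hne, hsub, hch⟩, ⟨b, t', rfl, hab⟩, rfl⟩)
    · exact ⟨hne, hsub.cons _, hch⟩
    · exact ⟨List.cons_ne_nil _ _, List.singleton_sublist.mpr (by simp), by simp⟩
    · exact ⟨List.cons_ne_nil _ _, List.cons_sublist_cons.mpr hsub, List.isChain_cons_cons.mpr ⟨hab, hch⟩⟩

lemma NDS_snoc (pre : List Char) (c : Char) (w : List Char) :
    NDS (pre ++ [c]) w ↔ NDS pre w ∨ w = [c] ∨
      ∃ p, NDS pre p ∧ (∃ b, p.getLast? = some b ∧ b ≤ c) ∧ w = p ++ [c] := by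
  constructor
  · rintro ⟨hne, hsub, hch⟩
    rcases List.sublist_append_iff.mp hsub with ⟨l1, l2, rfl, h1, h2⟩
    rcases List.sublist_singleton.mp h2 with rfl | rfl
    · exact Or.inl ⟨by simpa using hne, by simpa using h1, by simpa using hch⟩
    · rcases eq_or_ne l1 [] with rfl | hl1
      · exact Or.inr (Or.inl rfl)
      · rcases List.isChain_append.mp hch with ⟨hc1, _, hlast⟩
        refine Or.inr (Or.inr ⟨l1, ⟨hl1, h1, hc1⟩, ⟨l1.getLast hl1, ?_, ?_⟩, rfl⟩)
        · simp [List.getLast?_eq_getLast_of_ne_nil hl1]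
        · exact hlast _ (by simp [List.getLast?_eq_getLast_of_ne_nil hl1]) c (by simp)
  · rintro (⟨hne, hsub, hch⟩ | rfl | ⟨p, ⟨hne, hsub, hch⟩, ⟨b, hb, hbc⟩, rfl⟩)
    · exact ⟨hne, hsub.trans (List.sublist_append_left _ _), hch⟩
    · exact ⟨List.cons_ne_nil _ _, List.sublist_append_right _ _, by simp⟩
    · refine ⟨by simp, List.Sublist.append hsub (List.Sublist.refl _), ?_⟩
      refine List.isChain_append.mpr ⟨hch, by simp, ?_⟩
      intro x hx y hy
      rw [hb, Option.mem_some_iff] at hx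
      simp at hy
      subst hx; subst hy; exact hbc

lemma stepA_nil (a : Char) (acc : List (List Char)) : es78StepA a acc [] = acc := rfl
lemma stepA_cons (a b : Char) (t : List Char) (acc : List (List Char)) :
    es78StepA a acc (b :: t) =
      if a ≤ b && !(acc.contains (a :: b :: t)) then acc ++ [a :: b :: t] else acc := rfl

lemma foldA_mem (a : Char) (l : List (List Char)) :
    ∀ (acc : List (List Char)) (w : List Char),
      (w ∈ l.foldl (es78StepA a) acc
       ↔ w ∈ acc ∨ ∃ y ∈ l, (∃ b t', y = b :: t' ∧ a ≤ b) ∧ w = a :: y) := by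
  induction l with
  | nil => simp
  | cons y l ih =>
    intro acc w
    rw [List.foldl_cons]
    rcases y with _ | ⟨b, t⟩
    · rw [stepA_nil]
      simp only [ih]
      constructor
      · rintro (h | ⟨z, hz, hc, hw⟩)
        · exact Or.inl h
        · exact Or.inr ⟨z, by simp [hz], hc, hw⟩
      · rintro (h | ⟨z, hz, hc, hw⟩)
        · exact Or.inl h
        · rcases List.mem_cons.mp hz with rfl | hz'
          · rcases hc with ⟨_, _, h, _⟩; cases h
          · exact Or.inr ⟨z, hz', hc, hw⟩
    · rw [stepA_cons]
      by_cases hab : a ≤ b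
      · by_cases hmem : (a :: b :: t) ∈ acc
        · rw [if_neg (by simp [hmem])]
          simp only [ih]
          constructor
          · rintro (h | ⟨z, hz, hc, hw⟩)
            · exact Or.inl h
            · exact Or.inr ⟨z, by simp [hz], hc, hw⟩
          · rintro (h | ⟨z, hz, hc, hw⟩)
            · exact Or.inl h
            · rcases List.mem_cons.mp hz with rfl | hz'
              · subst hw; exact Or.inl hmem
              · exact Or.inr ⟨z, hz', hc, hw⟩
        · rw [if_pos (by simp [hmem, hab])]
          simp only [ih]
          constructor
          · rintro (h | ⟨z, hz, hc, hw⟩)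
            · rcases List.mem_append.mp h with h' | h'
              · exact Or.inl h'
              · simp at h'
                exact Or.inr ⟨b :: t, by simp, ⟨b, t, rfl, hab⟩, h'⟩
            · exact Or.inr ⟨z, by simp [hz], hc, hw⟩
          · rintro (h | ⟨z, hz, hc, hw⟩)
            · exact Or.inl (List.mem_append.mpr (Or.inl h))
            · rcases List.mem_cons.mp hz with rfl | hz'
              · exact Or.inl (List.mem_append.mpr (Or.inr (by simp [hw])))
              · exact Or.inr ⟨z, hz', hc, hw⟩
      · rw [if_neg (by simp [hab])]
        simp only [ih]
        constructor
        · rintro (h | ⟨z, hz, hc, hw⟩)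
          · exact Or.inl h
          · exact Or.inr ⟨z, by simp [hz], hc, hw⟩
        · rintro (h | ⟨z, hz, hc, hw⟩)
          · exact Or.inl h
          · rcases List.mem_cons.mp hz with rfl | hz'
            · rcases hc with ⟨b', t', he, hab'⟩
              cases he; exact absurd hab' hab
            · exact Or.inr ⟨z, hz', hc, hw⟩

lemma foldA_nodup (a : Char) (l : List (List Char)) :
    ∀ (acc : List (List Char)), acc.Nodup → (l.foldl (es78StepA a) acc).Nodup := by
  induction l with
  | nil => intro acc h; simpa using h
  | cons y l ih =>
    intro acc h
    rw [List.foldl_cons]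
    rcases y with _ | ⟨b, t⟩
    · rw [stepA_nil]; exact ih acc h
    · rw [stepA_cons]
      by_cases hg : (a ≤ b && !(acc.contains (a :: b :: t))) = true
      · rw [if_pos hg]
        apply ih
        simp at hg
        simp [List.nodup_append, h]
        intro x hx hxeq
        exact hg.2 (hxeq ▸ hx)
      · rw [if_neg hg]; exact ih acc h

lemma es78chars_nodup : ∀ (s : List Char), (es78chars s).Nodup := by
  intro s
  induction s using es78chars.induct with
  | case1 => simp [es78chars]
  | case2 c => simp [es78chars]
  | case3 a b t ih =>
    simp only [es78chars]
    apply ((PySem.List.sorted_perm _ _ _).nodup_iff).mpr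
    apply foldA_nodup
    by_cases hc : (es78chars (b :: t)).contains [a]
    · rw [if_pos hc]; exact ih
    · rw [if_neg hc]
      simp [List.nodup_append, ih]
      intro x hx hxeq
      subst hxeq
      exact hc (by simpa using List.contains_iff_mem.mpr hx)

lemma es78chars_mem : ∀ (s : List Char), s ≠ [] → ∀ (w : List Char), (w ∈ es78chars s ↔ NDS s w) := by
  intro s
  induction s using es78chars.induct with
  | case1 => intro h; exact absurd rfl h
  | case2 c =>
    intro _ w
    simp only [es78chars, List.mem_singleton]
    constructor
    · rintro rfl
      exact ⟨List.cons_ne_nil _ _, List.Sublist.refl _, by simp⟩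
    · rintro ⟨hne, hsub, _⟩
      rcases List.sublist_singleton.mp hsub with rfl | rfl
      · exact absurd rfl hne
      · rfl
  | case3 a b t ih =>
    intro _ w
    simp only [es78chars]
    rw [PySem.List.mem_sorted, foldA_mem, NDS_cons]
    have ih' := ih (List.cons_ne_nil _ _)
    have hmem1 : ∀ v, v ∈ (if (es78chars (b :: t)).contains [a] then es78chars (b :: t)
        else es78chars (b :: t) ++ [[a]]) ↔ v ∈ es78chars (b :: t) ∨ v = [a] := by
      intro v
      by_cases hc : (es78chars (b :: t)).contains [a]
      · rw [if_pos hc]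
        constructor
        · exact fun h => Or.inl h
        · rintro (h | rfl)
          · exact h
          · simpa using hc
      · rw [if_neg hc]
        simp
    rw [hmem1]
    simp only [ih']
    tauto

lemma es78chars_pairwise (s : List Char) :
    (es78chars s).Pairwise (fun x y => x ≤ y) := by
  induction s using es78chars.induct with
  | case1 => simp [es78chars]
  | case2 c => simp [es78chars]
  | case3 a b t ih =>
    simp only [es78chars]
    convert PySem.List.sorted_pairwise _ (fun x : List Char => x) using 2

lemma foldB_mem (c : Char) (res : List (List Char)) :
    ∀ (acc : List (List Char)) (w : List Char),
      (w ∈ res.foldl (es78AltInner c) acc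
       ↔ w ∈ acc ∨ ∃ p ∈ res, (∃ b, p.getLast? = some b ∧ b ≤ c) ∧ w = p ++ [c]) := by
  induction res with
  | nil => simp
  | cons p res ih =>
    intro acc w
    rw [List.foldl_cons]
    cases hlast : p.getLast? with
    | none =>
      rw [show es78AltInner c acc p = acc by simp [es78AltInner, hlast]]
      rw [ih]
      constructor
      · rintro (h | ⟨z, hz, hc, hw⟩)
        · exact Or.inl h
        · exact Or.inr ⟨z, by simp [hz], hc, hw⟩
      · rintro (h | ⟨z, hz, hc, hw⟩)
        · exact Or.inl h
        · rcases List.mem_cons.mp hz with rfl | hz'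
          · rcases hc with ⟨b, hb, _⟩; rw [hlast] at hb; cases hb
          · exact Or.inr ⟨z, hz', hc, hw⟩
    | some b =>
      by_cases hbc : b ≤ c
      · rw [show es78AltInner c acc p = PySem.Set.add acc (p ++ [c]) by simp [es78AltInner, hlast, hbc]]
        rw [ih]
        rw [PySem.Set.mem_add]
        constructor
        · rintro ((h | h) | ⟨z, hz, hc', hw⟩)
          · exact Or.inl h
          · exact Or.inr ⟨p, by simp, ⟨b, hlast, hbc⟩, h⟩
          · exact Or.inr ⟨z, by simp [hz], hc', hw⟩
        · rintro (h | ⟨z, hz, hc', hw⟩)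
          · exact Or.inl (Or.inl h)
          · rcases List.mem_cons.mp hz with rfl | hz'
            · exact Or.inl (Or.inr hw)
            · exact Or.inr ⟨z, hz', hc', hw⟩
      · rw [show es78AltInner c acc p = acc by simp [es78AltInner, hlast, hbc]]
        rw [ih]
        constructor
        · rintro (h | ⟨z, hz, hc', hw⟩)
          · exact Or.inl h
          · exact Or.inr ⟨z, by simp [hz], hc', hw⟩
        · rintro (h | ⟨z, hz, hc', hw⟩)
          · exact Or.inl h
          · rcases List.mem_cons.mp hz with rfl | hz'
            · rcases hc' with ⟨b', hb', hbc'⟩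
              rw [hlast] at hb'; cases hb'; exact absurd hbc' hbc
            · exact Or.inr ⟨z, hz', hc', hw⟩

lemma foldB_nodup (c : Char) (res : List (List Char)) :
    ∀ (acc : List (List Char)), acc.Nodup → (res.foldl (es78AltInner c) acc).Nodup := by
  induction res with
  | nil => intro acc h; simpa using h
  | cons p res ih =>
    intro acc h
    rw [List.foldl_cons]
    cases hlast : p.getLast? with
    | none => rw [show es78AltInner c acc p = acc by simp [es78AltInner, hlast]]; exact ih acc h
    | some b =>
      by_cases hbc : b ≤ c
      · rw [show es78AltInner c acc p = PySem.Set.add acc (p ++ [c]) by simp [es78AltInner, hlast, hbc]]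
        exact ih _ (PySem.Set.nodup_add _ _ h)
      · rw [show es78AltInner c acc p = acc by simp [es78AltInner, hlast, hbc]]; exact ih acc h

lemma stepB_mem (c : Char) (pre : List Char) (res : List (List Char))
    (hres : ∀ w, w ∈ res ↔ NDS pre w) :
    ∀ w, w ∈ es78AltStep c res ↔ NDS (pre ++ [c]) w := by
  intro w
  unfold es78AltStep
  rw [PySem.Set.mem_add, foldB_mem, NDS_snoc]
  simp only [hres]
  constructor
  · rintro ((h | h) | h)
    · exact Or.inl h
    · exact Or.inr (Or.inr h)
    · exact Or.inr (Or.inl h)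
  · rintro (h | h | h)
    · exact Or.inl (Or.inl h)
    · exact Or.inr h
    · exact Or.inl (Or.inr h)

lemma stepB_nodup (c : Char) (res : List (List Char)) (h : res.Nodup) :
    (es78AltStep c res).Nodup := by
  unfold es78AltStep
  exact PySem.Set.nodup_add _ _ (foldB_nodup c res res h)

lemma foldB_outer : ∀ (l pre : List Char) (res : List (List Char)),
    res.Nodup → (∀ w, w ∈ res ↔ NDS pre w) →
    (l.foldl (fun res c => es78AltStep c res) res).Nodup ∧
      (∀ w, w ∈ l.foldl (fun res c => es78AltStep c res) res ↔ NDS (pre ++ l) w) := by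
  intro l
  induction l with
  | nil =>
    intro pre res hnd hm
    simpa using ⟨hnd, hm⟩
  | cons c l ih =>
    intro pre res hnd hm
    rw [List.foldl_cons]
    have := ih (pre ++ [c]) (es78AltStep c res) (stepB_nodup c res hnd) (stepB_mem c pre res hm)
    rwa [List.append_assoc, List.singleton_append] at this

lemma NDS_nil (w : List Char) : ¬ NDS [] w := by
  rintro ⟨hne, hsub, -⟩
  exact hne (List.sublist_nil.mp hsub)

lemma core_eq (s : List Char) (hs : s ≠ []) : es78chars s = es78AltCore s := by
  have hB := foldB_outer s [] (PySem.Set.ofList [])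
    (by simp [PySem.Set.ofList]) (by intro w; simp [PySem.Set.ofList, NDS_nil w])
  have hmemB : ∀ w, w ∈ es78AltCore s ↔ NDS s w := by
    intro w
    unfold es78AltCore
    rw [PySem.List.mem_sorted]
    simpa using hB.2 w
  have hndB : (es78AltCore s).Nodup := by
    unfold es78AltCore
    exact ((PySem.List.sorted_perm _ _ _).nodup_iff).mpr hB.1
  have hpwB : (es78AltCore s).Pairwise (fun x y => x ≤ y) := by
    unfold es78AltCore
    convert PySem.List.sorted_pairwise _ (fun x : List Char => x) using 2
  have hperm : (es78chars s).Perm (es78AltCore s) := by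
    rw [List.perm_ext_iff_of_nodup (es78chars_nodup s) hndB]
    intro w
    rw [es78chars_mem s hs w, hmemB w]
  exact PySem.List.eq_of_perm_of_pairwise_le_of_injective (fun x : List Char => x)
    (fun _ _ h => h) hperm (es78chars_pairwise s) hpwB

-- ===== VERDICT (by name: the statement is the Claim_ definition above) =====
theorem es78_spec : Claim_equal_es78 := by
  intro parola _ hpre
  unfold Spec_es78 es78 es78_alt
  rw [core_eq]
  intro h
  exact hpre (by rwa [String.toList_eq_nil_iff] at h)
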